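-- pv_equiv track=rewrite | github.com/oussamanaji/NLP | CausalNet/src/clear_benchmark.py | split_results
-- ===== SOURCE A (Python) =====
-- def split_results(results):
--     split_results = {
--         'FA': [], 'FO': [], 'HM': [], 'CS': [], 'YN': [], 'EX': []
--     }
--     for result in results:
--         q_type = result['question_type']
--         if q_type in split_results:
--             split_results[q_type].append(result)
--     return split_results
-- ===== SOURCE B (Python) =====
-- def split_results(results):
--     # Build each bucket independently: one scan of `results` per fixed category.
--     return {k: [r for r in results if r['question_type'] == k]
--             for k in ('FA', 'FO', 'HM', 'CS', 'YN', 'EX')}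
-- ===== Notes on version B (the rewrite author's own statement) =====
-- stated objective: alternative
-- what changed: Replaces the single pass that appends into pre-seeded mutable buckets with six independent per-category filters over the results list (a dict comprehension over the fixed key tuple).
import Mathlib
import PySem

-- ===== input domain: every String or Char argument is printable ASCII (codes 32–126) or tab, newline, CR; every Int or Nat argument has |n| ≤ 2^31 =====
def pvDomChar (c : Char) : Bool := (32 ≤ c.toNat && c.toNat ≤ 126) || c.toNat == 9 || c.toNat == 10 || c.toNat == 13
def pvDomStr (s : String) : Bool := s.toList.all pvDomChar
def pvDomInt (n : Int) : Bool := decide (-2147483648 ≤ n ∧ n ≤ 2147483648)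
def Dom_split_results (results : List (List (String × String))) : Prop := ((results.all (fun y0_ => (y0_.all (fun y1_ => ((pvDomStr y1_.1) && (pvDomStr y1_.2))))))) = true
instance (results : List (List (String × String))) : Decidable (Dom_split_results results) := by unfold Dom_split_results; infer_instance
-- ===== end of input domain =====

-- B builds each bucket with an independent per-category filter instead of A's single
-- pass appending into pre-seeded mutable buckets (objective: alternative decomposition).


-- ===== PORT A =====
-- result['question_type'] on an association-list dict: first matching key (none = KeyError)
def pvQType (r : List (String × String)) : Option String :=
  (r.find? (fun p => p.1 == "question_type")).map (·.2)

-- the literal dict A seeds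
def pvInitBuckets : PySem.Dict String (List (List (String × String))) :=
  PySem.Dict.ofList [("FA", []), ("FO", []), ("HM", []), ("CS", []), ("YN", []), ("EX", [])]

-- one iteration of A's loop
def pvStepA (d : PySem.Dict String (List (List (String × String))))
    (r : List (String × String)) : PySem.Dict String (List (List (String × String))) :=
  match pvQType r with
  | none => d
  | some q => if d.contains q then d.modify q [] (fun l => l ++ [r]) else d

def split_results (results : List (List (String × String))) : List (String × List (List (String × String))) :=
  (results.foldl pvStepA pvInitBuckets).items

-- ===== PORT B =====
def split_results_alt (results : List (List (String × String))) : List (String × List (List (String × String))) :=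
  ["FA", "FO", "HM", "CS", "YN", "EX"].map
    (fun k => (k, results.filter (fun r => pvQType r == some k)))

-- ===== PRECONDITION & SPEC =====
-- Pre_ excludes exactly the inputs where some result dict lacks the 'question_type' key, on which Python A raises KeyError.
def Pre_split_results (results : List (List (String × String))) : Prop :=
  ∀ r ∈ results, "question_type" ∈ r.map (·.1)
instance (results : List (List (String × String))) : Decidable (Pre_split_results results) := by unfold Pre_split_results; infer_instance

def pvWitness_split_results : (List (List (String × String))) :=
  [[("question_type", "FA"), ("answer", "yes")], [("question_type", "ZZ")]]

def Spec_split_results (results : List (List (String × String))) (out : List (String × List (List (String × String)))) : Prop := out = split_results_alt results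
instance (results : List (List (String × String))) (out : List (String × List (List (String × String)))) : Decidable (Spec_split_results results out) := by unfold Spec_split_results; infer_instance

-- ===== CLAIM (what is proved, stated in full; the proofs are below) =====
def Claim_equal_split_results : Prop := ∀ (results : List (List (String × String))), Dom_split_results results → Pre_split_results results → Spec_split_results results (split_results results)

-- ===== LEMMAS AND PROOFS =====

-- invariant of A's loop: folding over `results` appends, behind each key already in the
-- dict, exactly the results whose question_type equals that key
lemma foldl_stepA_items (results : List (List (String × String))) :
    ∀ (d : PySem.Dict String (List (List (String × String)))), d.keys.Nodup →
      (results.foldl pvStepA d).items =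
        d.items.map (fun p => (p.1, p.2 ++ results.filter (fun r => pvQType r == some p.1))) := by
  induction results with
  | nil => intro d _; simp
  | cons r rs ih =>
    intro d hnd
    simp only [List.foldl_cons]
    cases hq : pvQType r with
    | none =>
      have hstep : pvStepA d r = d := by simp [pvStepA, hq]
      rw [hstep, ih d hnd]
      refine List.map_congr_left (fun p _ => ?_)
      simp [hq]
    | some q =>
      by_cases hc : d.contains q = true
      · have hstep : pvStepA d r = d.modify q [] (fun l => l ++ [r]) := by
          simp [pvStepA, hq, hc]
        have hnd' : (d.modify q [] (fun l => l ++ [r])).keys.Nodup := by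
          rw [PySem.Dict.keys_modify, PySem.Dict.keys_insert_of_contains _ _ hc]; exact hnd
        rw [hstep, ih _ hnd']
        have hitems : (d.modify q [] (fun l => l ++ [r])).items =
            d.items.map (fun p => if p.1 == q then (q, d.getD q [] ++ [r]) else p) := by
          simp only [PySem.Dict.modify, PySem.Dict.items_insert_of_contains _ _ hc]
        rw [hitems, List.map_map]
        refine List.map_congr_left (fun p hp => ?_)
        by_cases hpq : p.1 = q
        · have hval : d.getD q [] = p.2 := by
            rw [← hpq]
            exact PySem.Dict.getD_of_mem_items d (show (p.1, p.2) ∈ d.items by simpa using hp) hnd []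
          simp [Function.comp, hpq, hval, hq]
        · simp [Function.comp, hpq, hq, Ne.symm hpq]
      · have hstep : pvStepA d r = d := by simp [pvStepA, hq, hc]
        rw [hstep, ih d hnd]
        refine List.map_congr_left (fun p hp => ?_)
        have hpq : p.1 ≠ q := by
          intro h
          apply hc
          rw [PySem.Dict.contains_iff_mem_keys, ← h]
          exact PySem.Dict.mem_keys_of_mem_items d hp
        simp [hq, Ne.symm hpq]

-- ===== VERDICT (by name: the statement is the Claim_ definition above) =====
theorem split_results_spec : Claim_equal_split_results := by
  intro results _ _
  show split_results results = split_results_alt results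
  unfold split_results split_results_alt
  rw [foldl_stepA_items results pvInitBuckets (by decide),
    show pvInitBuckets.items = [("FA", []), ("FO", []), ("HM", []), ("CS", []), ("YN", []), ("EX", [])] from rfl]
  simp
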